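-- pv_equiv track=rewrite | github.com/gcd0318/pe | l5/pe113.py | bou2
-- ===== SOURCE A (Python) =====
-- def bou2(n):
--     res = n - 100
--     s = str(n)
--     i, j, k = 0, 1, 2
--     while (0 < res) and (i < len(s)-2):
--         res = res * (int(s[i]) - int(s[j])) * (int(s[j]) - int(s[k]))
--         i = i + 1
--         j = j + 1
--         k = j + 1
--     return res > 0
-- ===== SOURCE B (Python) =====
-- def bou2(n):
--     if n <= 100:
--         return False
--     s = str(n)
--     ds = [int(a) - int(b) for a, b in zip(s, s[1:])]
--     return all(d > 0 for d in ds) or all(d < 0 for d in ds)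
-- ===== Notes on version B (the rewrite author's own statement) =====
-- stated objective: simpler
-- what changed: Replaces A's accumulating running-product loop (res starts positive and is multiplied by each digit-window factor until it goes non-positive) with an early guard for small or non-positive n plus a direct test that the adjacent digit differences are all positive or all negative (strictly monotone digits), with no accumulator at all.
import Mathlib
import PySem

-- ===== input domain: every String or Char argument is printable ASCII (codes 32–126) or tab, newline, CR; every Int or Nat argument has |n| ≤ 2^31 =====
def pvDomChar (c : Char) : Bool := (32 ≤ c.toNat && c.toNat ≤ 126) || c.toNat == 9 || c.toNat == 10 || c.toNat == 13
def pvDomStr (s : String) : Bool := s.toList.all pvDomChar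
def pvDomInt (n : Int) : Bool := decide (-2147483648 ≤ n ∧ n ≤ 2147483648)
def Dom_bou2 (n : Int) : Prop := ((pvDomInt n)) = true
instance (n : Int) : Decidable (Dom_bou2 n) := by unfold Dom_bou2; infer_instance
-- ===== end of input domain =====

-- B replaces A's accumulating-product while-loop with a guard plus a direct
-- "strictly increasing or strictly decreasing digits" test (objective: simpler).

-- int(c) for a single decimal-digit character; exact on every executed path of both
-- programs, since the digit code only runs when n > 100, where str(n) is all digits.
def pvDigit (c : Char) : Int := (c.toNat : Int) - 48

-- ===== PORT A =====
-- the while-loop of A: state (res, i); j = i+1, k = i+2 throughout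
def bou2Loop (s : List Char) (res : Int) (i : Nat) : Int :=
  if h : 0 < res ∧ i + 2 < s.length then
    bou2Loop s
      (res * (pvDigit (s[i]'(by omega)) - pvDigit (s[i+1]'(by omega))) *
        (pvDigit (s[i+1]'(by omega)) - pvDigit (s[i+2]'h.2)))
      (i + 1)
  else res
termination_by s.length - i

def bou2 (n : Int) : Bool :=
  let res := n - 100
  let s := PySem.Int.toChars n   -- str(n) as its list of characters
  decide (bou2Loop s res 0 > 0)

-- ===== PORT B =====
def bou2_alt (n : Int) : Bool :=
  if n ≤ 100 then false
  else
    let s := PySem.Int.toChars n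
    let ds := List.zipWith (fun a b => pvDigit a - pvDigit b) s s.tail
    (ds.all fun d => decide (d > 0)) || (ds.all fun d => decide (d < 0))

-- ===== PRECONDITION & SPEC =====
def Spec_bou2 (n : Int) (out : Bool) : Prop := out = bou2_alt n
instance (n : Int) (out : Bool) : Decidable (Spec_bou2 n out) := by unfold Spec_bou2; infer_instance

-- ===== CLAIM (what is proved, stated in full; the proofs are below) =====
def Claim_equal_bou2 : Prop := ∀ (n : Int), Dom_bou2 n → Spec_bou2 n (bou2 n)

-- ===== LEMMAS AND PROOFS =====

-- digit difference s[k] - s[k+1], total via getElem!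
def pvE (s : List Char) (k : Nat) : Int := pvDigit s[k]! - pvDigit s[k+1]!

theorem pv_tdc_len_ge (f : Nat) : ∀ (m : Nat) (l : List Char), 0 < f →
    l.length + 1 ≤ (Nat.toDigitsCore 10 f m l).length := by
  induction f with
  | zero => omega
  | succ f ih =>
    intro m l _
    rw [Nat.toDigitsCore]
    split
    · simp
    · have := ih (m / 10) ((m % 10).digitChar :: l)
      by_cases hf : 0 < f
      · have := this hf; simp at this ⊢; omega
      · interval_cases f
        rw [Nat.toDigitsCore]; simp

-- str(n) has at least 3 characters when n > 100
theorem pv_toChars_len_ge3 (n : Int) (h : 100 < n) : 3 ≤ (PySem.Int.toChars n).length := by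
  unfold PySem.Int.toChars
  rw [if_neg (by omega)]
  have hm : 101 ≤ n.toNat := by omega
  unfold Nat.toDigits
  rw [Nat.toDigitsCore]
  rw [if_neg (by omega)]
  rcases Nat.exists_eq_succ_of_ne_zero (by omega : n.toNat ≠ 0) with ⟨f, hf⟩
  rw [hf, Nat.toDigitsCore]
  rw [if_neg (by omega)]
  have : 0 < f := by omega
  have := pv_tdc_len_ge f ((f+1) / 10 / 10)
    (((f+1) / 10 % 10).digitChar :: ((f+1) % 10).digitChar :: []) this
  simpa using this

theorem pv_loop_nonpos (s : List Char) (res : Int) (i : Nat) (h : res ≤ 0) :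
    bou2Loop s res i = res := by
  rw [bou2Loop]; rw [dif_neg (by omega)]

-- A's loop keeps res positive iff every remaining digit window has a positive factor
theorem pv_loop_pos_iff (s : List Char) (fuel : Nat) : ∀ (i : Nat) (res : Int),
    s.length - i ≤ fuel → 0 < res →
    (0 < bou2Loop s res i ↔ ∀ j, i ≤ j → j + 2 < s.length → 0 < pvE s j * pvE s (j+1)) := by
  induction fuel with
  | zero =>
    intro i res hf hr
    rw [bou2Loop, dif_neg (by omega)]
    constructor
    · intro _ j hij hj; omega
    · intro _; exact hr
  | succ fuel ih =>
    intro i res hf hr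
    by_cases hc : i + 2 < s.length
    · rw [bou2Loop, dif_pos ⟨hr, hc⟩]
      have hE : pvE s i = pvDigit (s[i]'(by omega)) - pvDigit (s[i+1]'(by omega)) := by
        unfold pvE
        rw [getElem!_pos s i (by omega), getElem!_pos s (i+1) (by omega)]
      have hE2 : pvE s (i+1) = pvDigit (s[i+1]'(by omega)) - pvDigit (s[i+2]'hc) := by
        unfold pvE
        rw [getElem!_pos s (i+1) (by omega), getElem!_pos s (i+2) (by omega)]
      set a := pvDigit (s[i]'(by omega)) - pvDigit (s[i+1]'(by omega)) with ha
      set b := pvDigit (s[i+1]'(by omega)) - pvDigit (s[i+2]'hc) with hb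
      by_cases hw : 0 < a * b
      · have hr' : 0 < res * a * b := by
          have := mul_pos hr hw; linarith [mul_assoc res a b]
        rw [ih (i+1) (res * a * b) (by omega) hr']
        constructor
        · intro h j hij hj
          rcases Nat.eq_or_lt_of_le hij with rfl | hlt
          · rw [hE, hE2]; exact hw
          · exact h j (by omega) hj
        · intro h j hij hj; exact h j (by omega) hj
      · have hr' : res * a * b ≤ 0 := by
          rcases le_or_gt (a*b) 0 with hab | hab
          · nlinarith
          · exact absurd hab hw
        rw [pv_loop_nonpos s _ _ hr']
        constructor
        · intro h; omega
        · intro h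
          exfalso
          have := h i (le_refl i) hc
          rw [hE, hE2] at this
          exact hw this
    · rw [bou2Loop, dif_neg (by omega)]
      constructor
      · intro _ j hij hj; omega
      · intro _; exact hr

-- adjacent windows all positive ↔ all differences positive or all negative
theorem pv_chain_iff (e : Nat → Int) (L : Nat) (hL : 3 ≤ L) :
    (∀ j, j + 2 < L → 0 < e j * e (j+1)) ↔
      ((∀ k, k + 1 < L → 0 < e k) ∨ (∀ k, k + 1 < L → e k < 0)) := by
  constructor
  · intro h
    have h0 : 0 < e 0 * e 1 := h 0 (by omega)
    rcases lt_trichotomy (e 0) 0 with h00 | h00 | h00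
    · right
      intro k
      induction k with
      | zero => intro _; exact h00
      | succ k ih =>
        intro hk
        have hek : e k < 0 := ih (by omega)
        have := h k (by omega)
        nlinarith
    · exfalso; rw [h00] at h0; simp at h0
    · left
      intro k
      induction k with
      | zero => intro _; exact h00
      | succ k ih =>
        intro hk
        have hek : 0 < e k := ih (by omega)
        have := h k (by omega)
        nlinarith
  · rintro (h | h) j hj
    · exact mul_pos (h j (by omega)) (h (j+1) (by omega))
    · exact mul_pos_of_neg_of_neg (h j (by omega)) (h (j+1) (by omega))

-- B's list-level 'all' over the difference list, read off index-wise
theorem pv_all_zip_iff (s : List Char) (p : Int → Bool) :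
    ((List.zipWith (fun a b => pvDigit a - pvDigit b) s s.tail).all p = true) ↔
      (∀ k, k + 1 < s.length → p (pvE s k) = true) := by
  rw [List.all_eq_true]
  constructor
  · intro h k hk
    have hmem : pvE s k ∈ List.zipWith (fun a b => pvDigit a - pvDigit b) s s.tail := by
      have hlen : k < (List.zipWith (fun a b => pvDigit a - pvDigit b) s s.tail).length := by
        simp [List.length_zipWith]; omega
      have : (List.zipWith (fun a b => pvDigit a - pvDigit b) s s.tail)[k] = pvE s k := by
        rw [List.getElem_zipWith]
        unfold pvE
        rw [List.getElem_tail]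
        rw [getElem!_pos s k (by omega), getElem!_pos s (k+1) (by omega)]
      exact this ▸ List.getElem_mem hlen
    exact h _ hmem
  · intro h x hx
    rw [List.mem_iff_getElem] at hx
    rcases hx with ⟨k, hk, rfl⟩
    have hk' : k + 1 < s.length := by
      simp [List.length_zipWith] at hk; omega
    have := h k hk'
    rw [List.getElem_zipWith]
    unfold pvE at this
    rw [List.getElem_tail] at *
    rw [getElem!_pos s k (by omega), getElem!_pos s (k+1) (by omega)] at this
    exact this

-- ===== VERDICT (by name: the statement is the Claim_ definition above) =====
theorem bou2_spec : Claim_equal_bou2 := by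
  intro n _
  unfold Spec_bou2 bou2 bou2_alt
  by_cases hn : n ≤ 100
  · rw [if_pos hn]
    show decide (bou2Loop (PySem.Int.toChars n) (n - 100) 0 > 0) = false
    rw [pv_loop_nonpos _ _ _ (by omega)]
    simp; omega
  · rw [if_neg hn]
    show decide (bou2Loop (PySem.Int.toChars n) (n - 100) 0 > 0) = _
    set s := PySem.Int.toChars n with hs
    have hL : 3 ≤ s.length := pv_toChars_len_ge3 n (by omega)
    rw [Bool.eq_iff_iff]
    rw [decide_eq_true_eq, Bool.or_eq_true, gt_iff_lt]
    rw [pv_loop_pos_iff s s.length 0 (n - 100) (by omega) (by omega)]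
    rw [pv_all_zip_iff s (fun d => decide (d > 0)), pv_all_zip_iff s (fun d => decide (d < 0))]
    simp only [decide_eq_true_eq]
    rw [show (∀ j, 0 ≤ j → j + 2 < s.length → 0 < pvE s j * pvE s (j+1)) ↔
          (∀ j, j + 2 < s.length → 0 < pvE s j * pvE s (j+1)) from
      ⟨fun h j => h j (Nat.zero_le j), fun h j _ => h j⟩]
    exact pv_chain_iff (pvE s) s.length hL
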